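-- pv_equiv track=rewrite | github.com/VoicuTomut/eYcel | src/eYcel/transformations.py | substitute_text_in_formula
-- ===== SOURCE A (Python) =====
-- from typing import Any, Dict, Optional, Union
--
-- def substitute_text_in_formula(formula: str, text_map: Dict[str, str]) -> str:
--     """Replace text literals inside a formula using the text map."""
--     result = []
--     i = 0
--     chars = list(formula)
--     while i < len(chars):
--         if chars[i] == '"':
--             start = i + 1
--             i += 1
--             while i < len(chars) and chars[i] != '"':
--                 i += 1
--             literal = "".join(chars[start:i])
--             replacement = text_map.get(literal, literal)
--             result.append('"')
--             result.append(replacement)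
--             result.append('"')
--             if i < len(chars):
--                 i += 1
--         else:
--             result.append(chars[i])
--             i += 1
--     return "".join(result)
-- ===== SOURCE B (Python) =====
-- def substitute_text_in_formula(formula: str, text_map: dict) -> str:
--     """Replace text literals inside a formula using the text map."""
--     parts = formula.split('"')
--     out = []
--     for i, part in enumerate(parts):
--         if i % 2 == 0:
--             out.append(part)
--         else:
--             out.append('"' + text_map.get(part, part) + '"')
--     return "".join(out)
-- ===== Notes on version B (the rewrite author's own statement) =====
-- stated objective: simpler
-- what changed: Replaces A's index-driven character scan with nested while loops by a single split('"') followed by a parity-indexed pass over the parts (even parts copied verbatim, odd parts looked up in the map and re-quoted).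
import Mathlib
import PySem

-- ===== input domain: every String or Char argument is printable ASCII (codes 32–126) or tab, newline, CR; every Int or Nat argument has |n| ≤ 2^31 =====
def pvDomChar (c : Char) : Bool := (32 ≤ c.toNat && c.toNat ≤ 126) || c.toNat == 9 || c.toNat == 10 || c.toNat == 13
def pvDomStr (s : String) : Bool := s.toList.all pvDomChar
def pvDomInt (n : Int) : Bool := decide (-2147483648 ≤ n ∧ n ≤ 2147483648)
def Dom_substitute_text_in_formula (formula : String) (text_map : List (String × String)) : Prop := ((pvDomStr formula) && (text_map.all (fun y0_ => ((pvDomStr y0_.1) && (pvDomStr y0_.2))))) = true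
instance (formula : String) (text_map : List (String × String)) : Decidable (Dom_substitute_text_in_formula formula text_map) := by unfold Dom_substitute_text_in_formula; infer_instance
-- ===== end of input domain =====

-- B replaces A's index-driven character scan by split('"') plus a parity-indexed
-- pass over the parts (objective: simpler); return values proved equal on all inputs.

-- text_map.get(k, k): first matching key in the association list, else the key itself
def pvMapGetD (tm : List (String × String)) (k : List Char) : List Char :=
  match tm.find? (fun p => p.1.toList == k) with
  | some p => p.2.toList
  | none => k

-- ===== PORT A =====
-- A's outer while-loop: cons recursion; the inner while collecting the literal up to
-- the next '"' is takeWhile/dropWhile; 'if i < len: i += 1' (skip closing quote) is drop 1.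
def pvGoA (tm : List (String × String)) : List Char → List Char
  | [] => []
  | c :: rest =>
    if c = '"' then
      let lit := rest.takeWhile (fun d => d ≠ '"')
      let rest' := rest.dropWhile (fun d => d ≠ '"')
      '"' :: (pvMapGetD tm lit ++ '"' :: pvGoA tm (rest'.drop 1))
    else c :: pvGoA tm rest
  termination_by l => l.length
  decreasing_by
    · simp only [List.length_drop, List.length_cons]
      have h1 := List.length_dropWhile_le (fun d => decide (d ≠ '"')) rest
      omega
    · simp

def substitute_text_in_formula (formula : String) (text_map : List (String × String)) : String :=
  String.mk (pvGoA text_map formula.toList)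

-- ===== PORT B =====
def substitute_text_in_formula_alt (formula : String) (text_map : List (String × String)) : String :=
  String.mk (PySem.Chars.join []
    ((PySem.List.enumerate (PySem.Chars.splitOn formula.toList ['"'])).foldl
      (fun acc ip =>
        if PySem.Int.mod ip.1 2 = 0 then acc ++ [ip.2]
        else acc ++ [('"' :: pvMapGetD text_map ip.2) ++ ['"']]) []))

-- ===== PRECONDITION & SPEC =====
def Spec_substitute_text_in_formula (formula : String) (text_map : List (String × String)) (out : String) : Prop := out = substitute_text_in_formula_alt formula text_map
instance (formula : String) (text_map : List (String × String)) (out : String) : Decidable (Spec_substitute_text_in_formula formula text_map out) := by unfold Spec_substitute_text_in_formula; infer_instance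

-- ===== CLAIM (what is proved, stated in full; the proofs are below) =====
def Claim_equal_substitute_text_in_formula : Prop := ∀ (formula : String) (text_map : List (String × String)), Dom_substitute_text_in_formula formula text_map → Spec_substitute_text_in_formula formula text_map (substitute_text_in_formula formula text_map)

-- ===== LEMMAS AND PROOFS =====

-- simple structural specification of split('"')
def pvSp : List Char → List (List Char)
  | [] => [[]]
  | c :: rest => if c = '"' then [] :: pvSp rest else (pvSp rest).modifyHead (c :: ·)

theorem pvSp_ne_nil (l : List Char) : pvSp l ≠ [] := by
  cases l with
  | nil => simp [pvSp]
  | cons c rest =>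
    simp only [pvSp]
    split_ifs
    · simp
    · cases h : pvSp rest with
      | nil => exact absurd h (pvSp_ne_nil rest)
      | cons q qs => simp [h]

theorem pvGo_eq (fuel : Nat) (l cur : List Char) (acc : List (List Char)) (h : l.length ≤ fuel) :
    PySem.Chars.splitOn.go ['"'] fuel l cur acc
      = acc.reverse ++ (pvSp l).modifyHead (cur.reverse ++ ·) := by
  induction fuel generalizing l cur acc with
  | zero =>
    have : l = [] := List.eq_nil_of_length_eq_zero (Nat.le_zero.mp h)
    subst this
    simp [PySem.Chars.splitOn.go, pvSp]
  | succ fuel ih =>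
    cases l with
    | nil => simp [PySem.Chars.splitOn.go, pvSp]
    | cons c rest =>
      by_cases hc : c = '"'
      · subst hc
        have hpre : List.isPrefixOf ['"'] ('"' :: rest) = true := by simp [List.isPrefixOf]
        rw [show PySem.Chars.splitOn.go ['"'] (fuel+1) ('"' :: rest) cur acc
              = PySem.Chars.splitOn.go ['"'] fuel rest [] (cur.reverse :: acc) by
            simp [PySem.Chars.splitOn.go, hpre]]
        rw [ih rest [] (cur.reverse :: acc) (by simpa using Nat.le_of_succ_le_succ h)]
        cases hsp : pvSp rest with
        | nil => exact absurd hsp (pvSp_ne_nil rest)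
        | cons q qs => simp [pvSp, hsp]
      · have hpre : List.isPrefixOf ['"'] (c :: rest) = false := by
          simp [List.isPrefixOf]; exact fun hh => absurd hh.symm hc
        rw [show PySem.Chars.splitOn.go ['"'] (fuel+1) (c :: rest) cur acc
              = PySem.Chars.splitOn.go ['"'] fuel rest (c :: cur) acc by
            simp [PySem.Chars.splitOn.go, hpre]]
        rw [ih rest (c :: cur) acc (by simpa using Nat.le_of_succ_le_succ h)]
        cases hsp : pvSp rest with
        | nil => exact absurd hsp (pvSp_ne_nil rest)
        | cons q qs => simp [pvSp, hc, hsp]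

theorem pvSplitOn_eq_sp (cs : List Char) : PySem.Chars.splitOn cs ['"'] = pvSp cs := by
  have h := pvGo_eq (cs.length + 1) cs [] [] (by omega)
  simp only [PySem.Chars.splitOn, h]
  cases hsp : pvSp cs with
  | nil => exact absurd hsp (pvSp_ne_nil cs)
  | cons q qs => simp

-- head/tail structure of pvSp: head is the quote-free prefix
def pvTailSp (l : List Char) : List (List Char) :=
  match l.dropWhile (fun d => d ≠ '"') with
  | [] => []
  | _ :: r => pvSp r

theorem pvSp_decomp (l : List Char) :
    pvSp l = l.takeWhile (fun d => d ≠ '"') :: pvTailSp l := by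
  induction l with
  | nil => simp [pvSp, pvTailSp]
  | cons c rest ih =>
    by_cases hc : c = '"'
    · subst hc; simp [pvSp, pvTailSp]
    · simp only [pvSp, pvTailSp, List.takeWhile_cons, List.dropWhile_cons, hc, decide_not]
      rw [ih]
      simp [pvTailSp]

-- the alternating chunk list B's enumerate loop builds, and its concatenation
def pvChunks (tm : List (String × String)) : Bool → List (List Char) → List (List Char)
  | _, [] => []
  | false, p :: ps => p :: pvChunks tm true ps
  | true, p :: ps => (('"' :: pvMapGetD tm p) ++ ['"']) :: pvChunks tm false ps

theorem pvJoin_nil_cons (p : List Char) (ps : List (List Char)) :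
    PySem.Chars.join [] (p :: ps) = p ++ PySem.Chars.join [] ps := by
  cases ps with
  | nil => simp [PySem.Chars.join, List.intercalate]
  | cons q qs => simp [PySem.Chars.join, List.intercalate, List.intersperse]

theorem pvJoin_chunks_false (tm : List (String × String)) (p : List Char) (ps : List (List Char)) :
    PySem.Chars.join [] (pvChunks tm false (p :: ps))
      = p ++ PySem.Chars.join [] (pvChunks tm true ps) := by
  simp [pvChunks, pvJoin_nil_cons]

theorem pvJoin_chunks_true (tm : List (String × String)) (p : List Char) (ps : List (List Char)) :
    PySem.Chars.join [] (pvChunks tm true (p :: ps))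
      = '"' :: (pvMapGetD tm p ++ '"' :: PySem.Chars.join [] (pvChunks tm false ps)) := by
  simp [pvChunks, pvJoin_nil_cons]

theorem pvMod_two_succ (n : Int) :
    (PySem.Int.mod n 2 = 0 → PySem.Int.mod (n + 1) 2 = 1)
    ∧ (PySem.Int.mod n 2 = 1 → PySem.Int.mod (n + 1) 2 = 0) := by
  have e : ∀ a : Int, PySem.Int.mod a 2 = a % 2 :=
    fun a => PySem.Int.mod_eq_emod_of_pos (by norm_num)
  rw [e, e]
  omega

theorem pvFoldl_enum (tm : List (String × String)) (ps : List (List Char)) :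
    ∀ (n : Int) (acc : List (List Char)),
    (PySem.List.enumerate ps n).foldl
      (fun acc ip =>
        if PySem.Int.mod ip.1 2 = 0 then acc ++ [ip.2]
        else acc ++ [('"' :: pvMapGetD tm ip.2) ++ ['"']]) acc
      = acc ++ pvChunks tm (PySem.Int.mod n 2 == 1) ps := by
  induction ps with
  | nil => intro n acc; simp [PySem.List.enumerate, pvChunks]
  | cons p ps ih =>
    intro n acc
    simp only [PySem.List.enumerate, List.foldl_cons]
    rcases PySem.Int.mod_two_eq n with h | h
    · rw [ih (n + 1), h, (pvMod_two_succ n).1 h]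
      simp [pvChunks]
    · rw [ih (n + 1), h, (pvMod_two_succ n).2 h]
      simp [pvChunks]

-- main invariant: A's scan equals B's even-phase concatenation of the split parts
theorem pvMain (tm : List (String × String)) :
    ∀ (n : Nat) (cs : List Char), cs.length ≤ n →
    pvGoA tm cs = PySem.Chars.join [] (pvChunks tm false (pvSp cs)) := by
  intro n
  induction n with
  | zero =>
    intro cs h
    have : cs = [] := List.eq_nil_of_length_eq_zero (Nat.le_zero.mp h)
    subst this
    simp [pvGoA, pvSp, pvChunks, pvJoin_nil_cons, PySem.Chars.join_nil]
  | succ n ih =>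
    intro cs h
    cases cs with
    | nil => simp [pvGoA, pvSp, pvChunks, pvJoin_nil_cons, PySem.Chars.join_nil]
    | cons c rest =>
      by_cases hc : c = '"'
      · subst hc
        rw [show pvGoA tm ('"' :: rest)
              = '"' :: (pvMapGetD tm (rest.takeWhile (fun d => d ≠ '"'))
                  ++ '"' :: pvGoA tm ((rest.dropWhile (fun d => d ≠ '"')).drop 1)) from by
            simp [pvGoA]]
        rw [show pvSp ('"' :: rest) = [] :: pvSp rest from by simp [pvSp]]
        rw [pvSp_decomp rest, pvJoin_chunks_false, pvJoin_chunks_true]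
        simp only [List.nil_append]
        have htail : pvGoA tm ((rest.dropWhile (fun d => d ≠ '"')).drop 1)
            = PySem.Chars.join [] (pvChunks tm false (pvTailSp rest)) := by
          unfold pvTailSp
          cases hdw : rest.dropWhile (fun d => d ≠ '"') with
          | nil => simp [pvChunks, PySem.Chars.join_nil, pvGoA]
          | cons d r =>
            have hlen := List.length_dropWhile_le (fun d => decide (d ≠ '"')) rest
            rw [hdw] at hlen
            simp only [List.length_cons] at hlen
            simp only [List.length_cons] at h
            simp only [List.drop_succ_cons, List.drop_zero]
            exact ih r (by omega)
        rw [htail]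
      · rw [show pvGoA tm (c :: rest) = c :: pvGoA tm rest from by simp [pvGoA, hc]]
        rw [show pvSp (c :: rest) = (pvSp rest).modifyHead (c :: ·) from by simp [pvSp, hc]]
        rw [pvSp_decomp rest]
        simp only [List.modifyHead_cons]
        rw [pvJoin_chunks_false, List.cons_append]
        rw [ih rest (by simpa using Nat.le_of_succ_le_succ h), pvSp_decomp rest,
          pvJoin_chunks_false]

-- ===== VERDICT (by name: the statement is the Claim_ definition above) =====
theorem substitute_text_in_formula_spec : Claim_equal_substitute_text_in_formula := by
  intro formula text_map _
  unfold Spec_substitute_text_in_formula substitute_text_in_formula substitute_text_in_formula_alt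
  rw [pvSplitOn_eq_sp, pvFoldl_enum, pvMain text_map formula.toList.length formula.toList le_rfl]
  simp [pvSp_decomp]
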